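-- pv_equiv track=rewrite | github.com/MoonSanghee/TIL | Baekjoon/새 폴더/1. Bronze/0.py | solution
-- ===== SOURCE A (Python) =====
-- def solution(numbers):
--     result = []
--     for overlap in numbers:
--         if numbers.count(overlap) >=2:
--             result.append(2 * overlap)
--
--     for i in range(len(numbers)):
--         a = sorted(list(set(numbers)))
--         b = list(reversed(a))
--         if i >= len(b):
--             break
--         for j in b[:len(a) - i - 1:]:
--             result.append(a[i] + j)
--     result = sorted(list(set(result)))
--
--     return result
-- ===== SOURCE B (Python) =====
-- def solution(numbers):
--     # One unified pass over suffixes: every unordered index pair contributes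
--     # numbers[i] + numbers[j] once into a set; duplicates double themselves.
--     sums = set()
--     tail = numbers
--     while tail:
--         head, tail = tail[0], tail[1:]
--         sums.update(head + y for y in tail)
--     return sorted(sums)
-- ===== Notes on version B (the rewrite author's own statement) =====
-- stated objective: simpler
-- what changed: A's two separate phases (counting duplicates to append doubled values, then summing pairs of distinct values read off a sorted set via reversed descending slices) are replaced by one pass over the suffixes of the list that collects every pairwise sum numbers[i]+numbers[j] (i<j) into a set and sorts it; duplicate-doubling falls out of equal-valued pairs.
import Mathlib
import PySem

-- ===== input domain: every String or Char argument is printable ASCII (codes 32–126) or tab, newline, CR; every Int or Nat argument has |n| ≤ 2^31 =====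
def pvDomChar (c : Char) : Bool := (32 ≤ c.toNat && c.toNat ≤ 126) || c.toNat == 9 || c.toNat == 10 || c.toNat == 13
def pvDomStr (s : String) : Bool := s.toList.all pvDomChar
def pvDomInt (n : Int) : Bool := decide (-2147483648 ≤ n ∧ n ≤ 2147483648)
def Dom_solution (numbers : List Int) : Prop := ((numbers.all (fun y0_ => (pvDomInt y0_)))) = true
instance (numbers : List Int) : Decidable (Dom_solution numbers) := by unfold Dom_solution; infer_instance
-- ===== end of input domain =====

-- B replaces A's two separate phases (duplicate-doubling by counts, then sums of distinct values
-- via a sorted set with descending slices) by one pass over the suffixes of the list collecting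
-- every pairwise sum into a set; objective: simpler.

-- ===== PORT A =====
-- A's second loop 'for i in range(len(numbers))', with its 'break' as an early return;
-- when a[i] is reached the break guard guarantees i < len(a), so pyGetD is exact here
def solutionLoop (numbers : List Int) : List Int → List Int → List Int
  | result, [] => result
  | result, i :: rest =>
      let a := PySem.List.sorted (PySem.Set.ofList numbers) (fun x => x) false
      let b := a.reverse
      if (b.length : Int) ≤ i then result
      else solutionLoop numbers
        (result ++ (PySem.List.slice b none (some ((a.length : Int) - i - 1))).map
          (fun j => PySem.List.pyGetD a i 0 + j)) rest

def solution (numbers : List Int) : List Int :=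
  let result := numbers.foldl
    (fun acc overlap => if 2 ≤ PySem.List.count numbers overlap then acc ++ [2 * overlap] else acc) []
  let result2 := solutionLoop numbers result (PySem.List.pyRange 0 (numbers.length : Int))
  PySem.List.sorted (PySem.Set.ofList result2) (fun x => x) false

-- ===== PORT B =====
-- Source B's 'while tail:' loop: peel off the head, add head + y into the set for each y of the tail
def solutionAltGo (sums : PySem.Set Int) : List Int → PySem.Set Int
  | [] => sums
  | head :: tail => solutionAltGo (PySem.Set.update sums (tail.map (fun y => head + y))) tail

def solution_alt (numbers : List Int) : List Int :=
  PySem.List.sorted (solutionAltGo PySem.Set.empty numbers) (fun x => x) false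

-- ===== PRECONDITION & SPEC =====
def Spec_solution (numbers : List Int) (out : List Int) : Prop := out = solution_alt numbers
instance (numbers : List Int) (out : List Int) : Decidable (Spec_solution numbers out) := by unfold Spec_solution; infer_instance

-- ===== CLAIM (what is proved, stated in full; the proofs are below) =====
def Claim_equal_solution : Prop := ∀ (numbers : List Int), Dom_solution numbers → Spec_solution numbers (solution numbers)

-- ===== LEMMAS AND PROOFS =====

-- the common value set: x is the sum of a length-2 sublist of numbers
def PairSum (numbers : List Int) (x : Int) : Prop :=
  ∃ p q, [p, q].Sublist numbers ∧ x = p + q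

-- A's sorted list of the distinct values
def sdist (numbers : List Int) : List Int :=
  PySem.List.sorted (PySem.Set.ofList numbers) (fun x => x) false

theorem mem_sdist (numbers : List Int) (x : Int) : x ∈ sdist numbers ↔ x ∈ numbers := by
  simp [sdist, PySem.List.mem_sorted, PySem.Set.mem_ofList]

theorem pairwise_sdist (numbers : List Int) : (sdist numbers).Pairwise (· < ·) :=
  PySem.List.sorted_ofList_pairwise_lt numbers

theorem len_sdist_le (numbers : List Int) : (sdist numbers).length ≤ numbers.length := by
  simpa [sdist, PySem.List.length_sorted] using PySem.Set.length_ofList_le numbers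

theorem pair_sublist_cons (p q h : Int) (t : List Int) :
    [p, q].Sublist (h :: t) ↔ (p = h ∧ q ∈ t) ∨ [p, q].Sublist t := by
  rw [List.sublist_cons_iff]
  constructor
  · rintro (hs | ⟨r, hr, hrs⟩)
    · exact Or.inr hs
    · injection hr with h1 h2
      subst h1; subst h2
      exact Or.inl ⟨rfl, List.singleton_sublist.mp hrs⟩
  · rintro (⟨rfl, hq⟩ | hs)
    · exact Or.inr ⟨[q], rfl, List.singleton_sublist.mpr hq⟩
    · exact Or.inl hs

theorem pair_sublist_mem {p q : Int} {l : List Int} (hs : [p, q].Sublist l) :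
    p ∈ l ∧ q ∈ l :=
  ⟨hs.subset (by simp), hs.subset (by simp)⟩

theorem pair_sublist_of_ne {p q : Int} {l : List Int} (hne : p ≠ q)
    (hp : p ∈ l) (hq : q ∈ l) : [p, q].Sublist l ∨ [q, p].Sublist l := by
  induction l with
  | nil => simp at hp
  | cons h t ih =>
    rcases List.mem_cons.mp hp with rfl | hp'
    · have hq' : q ∈ t := by
        rcases List.mem_cons.mp hq with rfl | h'
        · exact absurd rfl hne
        · exact h'
      exact Or.inl ((pair_sublist_cons _ _ _ _).mpr (Or.inl ⟨rfl, hq'⟩))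
    · rcases List.mem_cons.mp hq with rfl | hq'
      · exact Or.inr ((pair_sublist_cons _ _ _ _).mpr (Or.inl ⟨rfl, hp'⟩))
      · rcases ih hp' hq' with h1 | h1
        · exact Or.inl (h1.cons _)
        · exact Or.inr (h1.cons _)

theorem mem_solutionAltGo (l : List Int) (s : PySem.Set Int) (x : Int) :
    x ∈ solutionAltGo s l ↔ x ∈ s ∨ PairSum l x := by
  induction l generalizing s with
  | nil =>
    simp [solutionAltGo, PairSum]
  | cons h t ih =>
    rw [solutionAltGo, ih, PySem.Set.mem_update]
    unfold PairSum
    simp only [List.mem_map, pair_sublist_cons]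
    constructor
    · rintro ((hx | ⟨y, hy, rfl⟩) | ⟨p, q, hs, rfl⟩)
      · exact Or.inl hx
      · exact Or.inr ⟨h, y, Or.inl ⟨rfl, hy⟩, rfl⟩
      · exact Or.inr ⟨p, q, Or.inr hs, rfl⟩
    · rintro (hx | ⟨p, q, ⟨rfl, hq⟩ | hs, rfl⟩)
      · exact Or.inl (Or.inl hx)
      · exact Or.inl (Or.inr ⟨q, hq, rfl⟩)
      · exact Or.inr ⟨p, q, hs, rfl⟩

theorem nodup_solutionAltGo (l : List Int) (s : PySem.Set Int) (hs : s.Nodup) :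
    (solutionAltGo s l).Nodup := by
  induction l generalizing s with
  | nil => exact hs
  | cons h t ih => exact ih _ (PySem.Set.nodup_update _ _ hs)

theorem dup_mem (numbers : List Int) (x : Int) :
    x ∈ numbers.foldl
      (fun acc overlap => if 2 ≤ PySem.List.count numbers overlap then acc ++ [2 * overlap] else acc) [] ↔
    ∃ v, [v, v].Sublist numbers ∧ x = 2 * v := by
  rw [PySem.List.foldl_append_ite (p := fun v => 2 ≤ PySem.List.count numbers v) (f := fun v => 2 * v)]
  simp only [List.nil_append, List.mem_map, List.mem_filter, decide_eq_true_eq,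
    PySem.List.count_eq]
  constructor
  · rintro ⟨v, ⟨hv, hc⟩, rfl⟩
    refine ⟨v, ?_, rfl⟩
    have := List.replicate_sublist_iff.mpr hc
    simpa [List.replicate] using this
  · rintro ⟨v, hs, rfl⟩
    have hc : 2 ≤ numbers.count v := by
      apply List.replicate_sublist_iff.mp
      simpa [List.replicate] using hs
    exact ⟨v, ⟨(pair_sublist_mem hs).1, hc⟩, rfl⟩

theorem mem_revtake (a : List Int) (k : Nat) (hk : k < a.length) (y : Int) :
    y ∈ a.reverse.take (a.length - k - 1) ↔
      ∃ j, k < j ∧ j < a.length ∧ y = a.getD j 0 := by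
  constructor
  · intro hy
    rw [List.mem_iff_getElem] at hy
    obtain ⟨i, hi, hgi⟩ := hy
    have hlen : i < a.length - k - 1 := by
      have := hi; simp [List.length_take] at this; omega
    refine ⟨a.length - 1 - i, by omega, by omega, ?_⟩
    rw [List.getD_eq_getElem a 0 (by omega)]
    rw [List.getElem_take, List.getElem_reverse] at hgi
    exact hgi.symm
  · rintro ⟨j, hkj, hj, rfl⟩
    rw [List.mem_iff_getElem]
    refine ⟨a.length - 1 - j, ?_, ?_⟩
    · simp [List.length_take]; omega
    · rw [List.getElem_take, List.getElem_reverse]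
      rw [List.getD_eq_getElem a 0 hj]
      congr 1; omega

theorem loop_mem (numbers : List Int) (x : Int) :
    ∀ (d k : Nat) (result : List Int), numbers.length ≤ k + d →
    (x ∈ solutionLoop numbers result (PySem.List.pyRange (k : Int) (numbers.length : Int)) ↔
      x ∈ result ∨ ∃ i j : Nat, k ≤ i ∧ i < j ∧ j < (sdist numbers).length ∧
        x = (sdist numbers).getD i 0 + (sdist numbers).getD j 0) := by
  have hm := len_sdist_le numbers
  intro d
  induction d with
  | zero =>
    intro k result hk
    rw [PySem.List.pyRange_one_eq_nil (by exact_mod_cast Nat.le_of_lt_succ (by omega))]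
    · constructor
      · intro h; exact Or.inl (by simpa [solutionLoop] using h)
      · rintro (h | ⟨i, j, h1, h2, h3, _⟩)
        · simpa [solutionLoop]
        · omega
  | succ d ih =>
    intro k result hk
    by_cases hkn : k < numbers.length
    · rw [PySem.List.pyRange_one_cons (by exact_mod_cast hkn)]
      rw [solutionLoop]
      rw [show PySem.List.sorted (PySem.Set.ofList numbers) (fun x => x) false = sdist numbers from rfl]
      simp only [List.length_reverse]
      by_cases hkm : (sdist numbers).length ≤ k
      · rw [if_pos (by exact_mod_cast hkm)]
        constructor
        · exact Or.inl
        · rintro (h | ⟨i, j, h1, h2, h3, _⟩)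
          · exact h
          · omega
      · rw [if_neg (by omega)]
        have hcast : ((k : Nat) : Int) + 1 = (((k+1 : Nat)) : Int) := by push_cast; ring
        rw [hcast, ih (k+1) _ (by omega)]
        have hchunk : ∀ y : Int,
            (y ∈ (PySem.List.slice (sdist numbers).reverse none
                    (some (((sdist numbers).length : Int) - (k:Int) - 1))).map
                (fun j => PySem.List.pyGetD (sdist numbers) (k:Int) 0 + j)) ↔
            ∃ j, k < j ∧ j < (sdist numbers).length ∧
              y = (sdist numbers).getD k 0 + (sdist numbers).getD j 0 := by
          intro y
          rw [PySem.List.slice_to _ (by omega)]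
          have ht : (((sdist numbers).length : Int) - (k:Int) - 1).toNat
              = (sdist numbers).length - k - 1 := by omega
          rw [ht]
          simp only [List.mem_map, PySem.List.pyGetD_natCast]
          constructor
          · rintro ⟨z, hz, rfl⟩
            obtain ⟨j, h1, h2, rfl⟩ := (mem_revtake (sdist numbers) k (by omega) z).mp hz
            exact ⟨j, h1, h2, rfl⟩
          · rintro ⟨j, h1, h2, rfl⟩
            exact ⟨(sdist numbers).getD j 0,
              (mem_revtake (sdist numbers) k (by omega) _).mpr ⟨j, h1, h2, rfl⟩, rfl⟩
        show (x ∈ result ++ _ ∨ _) ↔ _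
        rw [List.mem_append]
        constructor
        · rintro ((hx | hx) | ⟨i, j, h1, h2, h3, h4⟩)
          · exact Or.inl hx
          · obtain ⟨j, h1, h2, h3⟩ := (hchunk x).mp (by exact hx)
            exact Or.inr ⟨k, j, le_refl k, h1, h2, h3⟩
          · exact Or.inr ⟨i, j, by omega, h2, h3, h4⟩
        · rintro (hx | ⟨i, j, h1, h2, h3, h4⟩)
          · exact Or.inl (Or.inl hx)
          · by_cases hik : i = k
            · subst hik
              exact Or.inl (Or.inr ((hchunk x).mpr ⟨j, h2, h3, h4⟩))
            · exact Or.inr ⟨i, j, by omega, h2, h3, h4⟩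
    · rw [PySem.List.pyRange_one_eq_nil (by exact_mod_cast (by omega : numbers.length ≤ k))]
      constructor
      · intro h; exact Or.inl (by simpa [solutionLoop] using h)
      · rintro (h | ⟨i, j, h1, h2, h3, _⟩)
        · simpa [solutionLoop]
        · omega

theorem pairs_iff (numbers : List Int) (x : Int) :
    (∃ i j : Nat, 0 ≤ i ∧ i < j ∧ j < (sdist numbers).length ∧
        x = (sdist numbers).getD i 0 + (sdist numbers).getD j 0) ↔
      ∃ p q, p ≠ q ∧ p ∈ numbers ∧ q ∈ numbers ∧ x = p + q := by
  have hpw := List.pairwise_iff_getElem.mp (pairwise_sdist numbers)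
  constructor
  · rintro ⟨i, j, -, hij, hj, rfl⟩
    have hi : i < (sdist numbers).length := by omega
    rw [List.getD_eq_getElem _ 0 hi, List.getD_eq_getElem _ 0 hj]
    refine ⟨_, _, ne_of_lt (hpw i j hi hj hij), ?_, ?_, rfl⟩
    · exact (mem_sdist numbers _).mp (List.getElem_mem hi)
    · exact (mem_sdist numbers _).mp (List.getElem_mem hj)
  · rintro ⟨p, q, hne, hp, hq, rfl⟩
    obtain ⟨ip, hip, hgp⟩ := List.mem_iff_getElem.mp ((mem_sdist numbers p).mpr hp)
    obtain ⟨iq, hiq, hgq⟩ := List.mem_iff_getElem.mp ((mem_sdist numbers q).mpr hq)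
    rcases lt_trichotomy ip iq with h | h | h
    · exact ⟨ip, iq, Nat.zero_le _, h, hiq, by
        rw [List.getD_eq_getElem _ 0 hip, List.getD_eq_getElem _ 0 hiq, hgp, hgq]⟩
    · subst h; exact absurd (hgp.symm.trans hgq) hne
    · exact ⟨iq, ip, Nat.zero_le _, h, hip, by
        rw [List.getD_eq_getElem _ 0 hiq, List.getD_eq_getElem _ 0 hip, hgp, hgq]; ring⟩

theorem pairSum_iff (numbers : List Int) (x : Int) :
    PairSum numbers x ↔
      (∃ v, [v, v].Sublist numbers ∧ x = 2 * v) ∨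
      (∃ p q, p ≠ q ∧ p ∈ numbers ∧ q ∈ numbers ∧ x = p + q) := by
  constructor
  · rintro ⟨p, q, hs, rfl⟩
    by_cases hpq : p = q
    · subst hpq; exact Or.inl ⟨p, hs, by ring⟩
    · exact Or.inr ⟨p, q, hpq, (pair_sublist_mem hs).1, (pair_sublist_mem hs).2, rfl⟩
  · rintro (⟨v, hs, rfl⟩ | ⟨p, q, hne, hp, hq, rfl⟩)
    · exact ⟨v, v, hs, by ring⟩
    · rcases pair_sublist_of_ne hne hp hq with h1 | h1
      · exact ⟨p, q, h1, rfl⟩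
      · exact ⟨q, p, h1, by ring⟩

theorem solution_eq_alt (numbers : List Int) : solution numbers = solution_alt numbers := by
  unfold solution solution_alt
  apply PySem.List.sorted_eq_sorted_of_perm _ _ (fun x => x) (fun a b h => h)
  rw [List.perm_ext_iff_of_nodup (PySem.Set.nodup_ofList _)
    (nodup_solutionAltGo _ PySem.Set.empty (by simp [PySem.Set.empty]))]
  intro x
  rw [PySem.Set.mem_ofList]
  have hloop := loop_mem numbers x numbers.length 0
    (numbers.foldl (fun acc overlap =>
      if 2 ≤ PySem.List.count numbers overlap then acc ++ [2 * overlap] else acc) [])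
    (by omega)
  rw [show ((0 : Nat) : Int) = (0 : Int) from rfl] at hloop
  rw [hloop, dup_mem, mem_solutionAltGo]
  have : (x ∈ PySem.Set.empty) ↔ False := by simp [PySem.Set.empty]
  rw [this, false_or, pairSum_iff]
  constructor
  · rintro (h | ⟨i, j, h1, h2, h3, h4⟩)
    · exact Or.inl h
    · exact Or.inr ((pairs_iff numbers x).mp ⟨i, j, h1, h2, h3, h4⟩)
  · rintro (h | h)
    · exact Or.inl h
    · obtain ⟨i, j, h1, h2, h3, h4⟩ := (pairs_iff numbers x).mpr h
      exact Or.inr ⟨i, j, h1, h2, h3, h4⟩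

-- ===== VERDICT (by name: the statement is the Claim_ definition above) =====
theorem solution_spec : Claim_equal_solution := by
  intro numbers _
  unfold Spec_solution
  exact solution_eq_alt numbers
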